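-- pv_equiv track=rewrite | github.com/HieuNTg/STORYFORGE | pipeline/layer1_story/pacing_controller.py | suggest_next_pacing
-- ===== SOURCE A (Python) =====
-- def suggest_next_pacing(pacing_history: list[str]) -> str:
--     """Suggest ideal pacing for the next chapter based on history."""
--     if not pacing_history:
--         return "setup"
--
--     last = pacing_history[-1]
--     if last == "climax":
--         return "cooldown"
--     if last == "cooldown":
--         return "setup"
--     if last == "setup":
--         return "rising"
--     if last == "rising":
--         # After 2+ rising, suggest climax
--         rising_count = 0
--         for p in reversed(pacing_history):
--             if p == "rising":
--                 rising_count += 1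
--             else:
--                 break
--         return "climax" if rising_count >= 2 else "rising"
--     return "rising"
-- ===== SOURCE B (Python) =====
-- def suggest_next_pacing(pacing_history: list[str]) -> str:
--     """Suggest ideal pacing for the next chapter based on history."""
--     if not pacing_history:
--         return "setup"
--     last = pacing_history[-1]
--     table = {"climax": "cooldown", "cooldown": "setup", "setup": "rising"}
--     if last in table:
--         return table[last]
--     if last == "rising":
--         # After 2+ consecutive rising chapters, suggest climax: a direct
--         # check of the second-to-last entry replaces the reversed scan.
--         if len(pacing_history) >= 2 and pacing_history[-2] == "rising":
--             return "climax"
--         return "rising"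
--     return "rising"
-- ===== Notes on version B (the rewrite author's own statement) =====
-- stated objective: simpler
-- what changed: The reversed counting loop over the trailing run of 'rising' is removed: since the loop only ever needs to know whether the run has length >= 2, B replaces it with a table dispatch plus a single closed-form check of pacing_history[-2].
import Mathlib
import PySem

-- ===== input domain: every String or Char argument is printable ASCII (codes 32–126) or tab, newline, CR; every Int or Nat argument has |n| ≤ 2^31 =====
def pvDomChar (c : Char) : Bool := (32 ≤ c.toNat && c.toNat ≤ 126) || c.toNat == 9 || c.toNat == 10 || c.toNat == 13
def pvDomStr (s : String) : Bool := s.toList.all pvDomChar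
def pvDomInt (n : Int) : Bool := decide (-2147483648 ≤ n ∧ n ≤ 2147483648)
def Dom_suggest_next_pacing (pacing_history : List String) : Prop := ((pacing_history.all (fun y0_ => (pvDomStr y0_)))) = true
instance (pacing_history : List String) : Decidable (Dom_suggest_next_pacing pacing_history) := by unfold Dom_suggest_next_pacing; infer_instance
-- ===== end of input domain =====

-- B replaces A's reversed counting loop over the trailing 'rising' run with a
-- table dispatch and a single closed-form check of pacing_history[-2] (simpler).

-- ===== PORT A =====
-- counts the leading run of "rising" in the (already reversed) list:
-- the 'for p in reversed(...)' loop with its break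
def pvRisingRun (r : List String) : Nat :=
  match r with
  | [] => 0
  | p :: rest => if p = "rising" then 1 + pvRisingRun rest else 0

def suggest_next_pacing (pacing_history : List String) : String :=
  -- 'if not pacing_history: return "setup"' and 'last = pacing_history[-1]'
  -- are rendered by matching on the reversed list (exact: [-1] on a nonempty
  -- list is the head of its reverse)
  match pacing_history.reverse with
  | [] => "setup"
  | last :: _ =>
    if last = "climax" then "cooldown"
    else if last = "cooldown" then "setup"
    else if last = "setup" then "rising"
    else if last = "rising" then
      let rising_count := pvRisingRun pacing_history.reverse
      if rising_count ≥ 2 then "climax" else "rising"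
    else "rising"

-- ===== PORT B =====
def suggest_next_pacing_alt (pacing_history : List String) : String :=
  match pacing_history.reverse with
  | [] => "setup"
  | last :: prev =>
    -- table = {"climax": "cooldown", "cooldown": "setup", "setup": "rising"}
    let table : PySem.Dict String String :=
      PySem.Dict.mk [("climax", "cooldown"), ("cooldown", "setup"), ("setup", "rising")]
    match PySem.Dict.get? table last with
    | some v => v
    | none =>
      if last = "rising" then
        -- pacing_history[-2] == "rising" (guarded): head of prev
        if prev.head? = some "rising" then "climax" else "rising"
      else "rising"

-- ===== PRECONDITION & SPEC =====
def Spec_suggest_next_pacing (pacing_history : List String) (out : String) : Prop := out = suggest_next_pacing_alt pacing_history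
instance (pacing_history : List String) (out : String) : Decidable (Spec_suggest_next_pacing pacing_history out) := by unfold Spec_suggest_next_pacing; infer_instance

-- ===== CLAIM (what is proved, stated in full; the proofs are below) =====
def Claim_equal_suggest_next_pacing : Prop := ∀ (pacing_history : List String), Dom_suggest_next_pacing pacing_history → Spec_suggest_next_pacing pacing_history (suggest_next_pacing pacing_history)

-- ===== LEMMAS AND PROOFS =====

-- ===== VERDICT (by name: the statement is the Claim_ definition above) =====
theorem suggest_next_pacing_spec : Claim_equal_suggest_next_pacing := by
  intro ph _
  unfold Spec_suggest_next_pacing suggest_next_pacing suggest_next_pacing_alt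
  cases h : ph.reverse with
  | nil => rfl
  | cons last prev =>
    by_cases h1 : last = "climax"
    · simp [h1, PySem.Dict.get?, List.find?]
    · by_cases h2 : last = "cooldown"
      · simp [h2, PySem.Dict.get?, List.find?]
      · by_cases h3 : last = "setup"
        · simp [h3, PySem.Dict.get?, List.find?]
        · by_cases h4 : last = "rising"
          · simp only [h4, if_true, PySem.Dict.get?, List.find?]
            cases prev with
            | nil => simp [pvRisingRun]
            | cons q rest =>
              by_cases hq : q = "rising"
              · simp [pvRisingRun, hq]
              · simp [pvRisingRun, hq]
          · have h1' : "climax" ≠ last := fun e => h1 e.symm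
            have h2' : "cooldown" ≠ last := fun e => h2 e.symm
            have h3' : "setup" ≠ last := fun e => h3 e.symm
            have e1 : ("climax" == last) = false := beq_eq_false_iff_ne.mpr h1'
            have e2 : ("cooldown" == last) = false := beq_eq_false_iff_ne.mpr h2'
            have e3 : ("setup" == last) = false := beq_eq_false_iff_ne.mpr h3'
            simp [h1, h2, h4, e1, e2, e3, PySem.Dict.get?, List.find?]
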